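-- pv_equiv track=rewrite | github.com/FabioLiberti/RESerch_MON | backend/app/services/query_generator.py | _generate_keyword_queries
-- ===== SOURCE A (Python) =====
-- def _generate_keyword_queries(keywords: list[str]) -> dict[str, str]:
--     """Default: search keywords in title + abstract."""
--     pubmed_parts = [f'"{kw}"[Title/Abstract]' for kw in keywords]
--     arxiv_parts = [f'(ti:"{kw}" OR abs:"{kw}")' for kw in keywords]
--     ieee_parts = [f'"{kw}"' for kw in keywords]
--     # Scopus: TITLE-ABS-KEY combines title, abstract, and keywords
--     elsevier_parts = [f'TITLE-ABS-KEY("{kw}")' for kw in keywords]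
--
--     return {
--         "pubmed": " AND ".join(pubmed_parts),
--         "arxiv": " AND ".join(arxiv_parts),
--         "semantic_scholar": " ".join(keywords),
--         "ieee": " AND ".join(ieee_parts),
--         "biorxiv": " ".join(keywords),
--         "elsevier": " AND ".join(elsevier_parts),
--         # iris_who: plain keyword list (client does local tokenization + title/abstract/subject ranking)
--         "iris_who": " ".join(keywords),
--     }
-- ===== SOURCE B (Python) =====
-- # One incremental pass: a single loop over the keywords threads five string
-- # accumulators (with a first-flag for separators), instead of A's four
-- # intermediate per-database lists that are then joined.
-- def _generate_keyword_queries(keywords: list[str]) -> dict[str, str]: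
--     pubmed = arxiv = plain = ieee = elsevier = ""
--     first = True
--     for kw in keywords:
--         if first:
--             pubmed = f'"{kw}"[Title/Abstract]'
--             arxiv = f'(ti:"{kw}" OR abs:"{kw}")'
--             plain = kw
--             ieee = f'"{kw}"'
--             elsevier = f'TITLE-ABS-KEY("{kw}")'
--             first = False
--         else:
--             pubmed += " AND " + f'"{kw}"[Title/Abstract]'
--             arxiv += " AND " + f'(ti:"{kw}" OR abs:"{kw}")'
--             plain += " " + kw
--             ieee += " AND " + f'"{kw}"'
--             elsevier += " AND " + f'TITLE-ABS-KEY("{kw}")'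
--     return {
--         "pubmed": pubmed,
--         "arxiv": arxiv,
--         "semantic_scholar": plain,
--         "ieee": ieee,
--         "biorxiv": plain,
--         "elsevier": elsevier,
--         "iris_who": plain,
--     }
-- ===== Notes on version B (the rewrite author's own statement) =====
-- stated objective: alternative
-- what changed: Replaces A's four intermediate per-database comprehension lists plus str.join with a single incremental loop over the keywords that threads five string accumulators (separator handled by a first-flag), so no intermediate lists are built.
import Mathlib
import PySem

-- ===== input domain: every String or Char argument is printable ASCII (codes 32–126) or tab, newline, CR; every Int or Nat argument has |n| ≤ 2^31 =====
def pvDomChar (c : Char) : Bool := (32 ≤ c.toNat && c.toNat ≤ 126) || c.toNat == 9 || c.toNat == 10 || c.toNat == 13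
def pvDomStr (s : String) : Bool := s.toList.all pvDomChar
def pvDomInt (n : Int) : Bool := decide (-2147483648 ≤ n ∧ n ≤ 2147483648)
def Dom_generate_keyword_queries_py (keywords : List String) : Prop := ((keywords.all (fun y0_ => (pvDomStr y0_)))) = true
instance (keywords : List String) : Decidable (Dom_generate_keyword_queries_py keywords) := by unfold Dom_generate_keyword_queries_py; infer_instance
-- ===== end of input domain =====

-- B replaces A's four intermediate per-database comprehension lists + str.join with one
-- incremental loop threading five string accumulators and a first-flag (objective: alternative).

-- ===== PORT A =====
def generate_keyword_queries_py (keywords : List String) : List (String × String) :=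
  let pubmed_parts := keywords.map (fun kw => "\"" ++ kw ++ "\"[Title/Abstract]")
  let arxiv_parts := keywords.map (fun kw => "(ti:\"" ++ kw ++ "\" OR abs:\"" ++ kw ++ "\")")
  let ieee_parts := keywords.map (fun kw => "\"" ++ kw ++ "\"")
  let elsevier_parts := keywords.map (fun kw => "TITLE-ABS-KEY(\"" ++ kw ++ "\")")
  [("pubmed", PySem.Str.join " AND " pubmed_parts),
   ("arxiv", PySem.Str.join " AND " arxiv_parts),
   ("semantic_scholar", PySem.Str.join " " keywords),
   ("ieee", PySem.Str.join " AND " ieee_parts),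
   ("biorxiv", PySem.Str.join " " keywords),
   ("elsevier", PySem.Str.join " AND " elsevier_parts),
   ("iris_who", PySem.Str.join " " keywords)]

-- ===== PORT B =====
-- the body of Source B's loop: one step of the accumulator pass
def pvStep (st : String × String × String × String × String × Bool) (kw : String) :
    String × String × String × String × String × Bool :=
  match st with
  | (pubmed, arxiv, plain, ieee, elsevier, first) =>
    if first then
      ("\"" ++ kw ++ "\"[Title/Abstract]",
       "(ti:\"" ++ kw ++ "\" OR abs:\"" ++ kw ++ "\")",
       kw,
       "\"" ++ kw ++ "\"",
       "TITLE-ABS-KEY(\"" ++ kw ++ "\")",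
       false)
    else
      (pubmed ++ (" AND " ++ ("\"" ++ kw ++ "\"[Title/Abstract]")),
       arxiv ++ (" AND " ++ ("(ti:\"" ++ kw ++ "\" OR abs:\"" ++ kw ++ "\")")),
       plain ++ (" " ++ kw),
       ieee ++ (" AND " ++ ("\"" ++ kw ++ "\"")),
       elsevier ++ (" AND " ++ ("TITLE-ABS-KEY(\"" ++ kw ++ "\")")),
       false)

def generate_keyword_queries_py_alt (keywords : List String) : List (String × String) :=
  let r := keywords.foldl pvStep ("", "", "", "", "", true)
  [("pubmed", r.1),
   ("arxiv", r.2.1),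
   ("semantic_scholar", r.2.2.1),
   ("ieee", r.2.2.2.1),
   ("biorxiv", r.2.2.1),
   ("elsevier", r.2.2.2.2.1),
   ("iris_who", r.2.2.1)]

-- ===== PRECONDITION & SPEC =====
def Spec_generate_keyword_queries_py (keywords : List String) (out : List (String × String)) : Prop := out = generate_keyword_queries_py_alt keywords
instance (keywords : List String) (out : List (String × String)) : Decidable (Spec_generate_keyword_queries_py keywords out) := by unfold Spec_generate_keyword_queries_py; infer_instance

-- ===== CLAIM (what is proved, stated in full; the proofs are below) =====
def Claim_equal_generate_keyword_queries_py : Prop := ∀ (keywords : List String), Dom_generate_keyword_queries_py keywords → Spec_generate_keyword_queries_py keywords (generate_keyword_queries_py keywords)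

-- ===== LEMMAS AND PROOFS =====

-- "the tail of a join": extJ sep l = concatenation of (sep ++ s) over l
def extJ (sep : String) : List String → String
  | [] => ""
  | s :: ss => sep ++ s ++ extJ sep ss

lemma join_ext (sep : String) (xs : List String) (x : String) :
    PySem.Str.join sep (x :: xs) = x ++ extJ sep xs := by
  induction xs generalizing x with
  | nil => simp [PySem.Str.join, PySem.Chars.join_singleton, extJ]
  | cons y ys ih =>
      have h : PySem.Str.join sep (x :: y :: ys) = x ++ sep ++ PySem.Str.join sep (y :: ys) := by
        simp [PySem.Str.join, PySem.Chars.join_cons_cons, String.append_assoc]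
      rw [h, ih, extJ]
      simp [String.append_assoc]

lemma foldl_step_false (l : List String) (p a pl i e : String) :
    l.foldl pvStep (p, a, pl, i, e, false) =
      (p ++ extJ " AND " (l.map (fun kw => "\"" ++ kw ++ "\"[Title/Abstract]")),
       a ++ extJ " AND " (l.map (fun kw => "(ti:\"" ++ kw ++ "\" OR abs:\"" ++ kw ++ "\")")),
       pl ++ extJ " " l,
       i ++ extJ " AND " (l.map (fun kw => "\"" ++ kw ++ "\"")),
       e ++ extJ " AND " (l.map (fun kw => "TITLE-ABS-KEY(\"" ++ kw ++ "\")")),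
       false) := by
  induction l generalizing p a pl i e with
  | nil => simp [extJ]
  | cons x xs ih =>
      simp only [List.foldl_cons, pvStep, if_neg (Bool.false_ne_true), List.map_cons, extJ]
      rw [ih]
      simp [String.append_assoc]

-- ===== VERDICT (by name: the statement is the Claim_ definition above) =====
theorem generate_keyword_queries_py_spec : Claim_equal_generate_keyword_queries_py := by
  intro keywords _
  show _ = _
  cases keywords with
  | nil => decide
  | cons x xs =>
      simp only [generate_keyword_queries_py, generate_keyword_queries_py_alt,
        List.foldl_cons, pvStep, if_true, foldl_step_false, List.map_cons, join_ext]
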